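/-
  THE FIELD VOCABULARY: how an invariant of the decoder talks about the C structs in the flat memory `User.Mem`.
  Everything Q2–Q8 (Arena, Bits, Codebook, Floor, ResidueMapping, Mdct, State) and the function proofs need to READ a field,
  to CARRY it over a store, and to JUSTIFY a check site. Worked examples of every item: Vorbis/FieldsTest.lean.

  FILES.  Vorbis/Fields/Core.lean      hand-written: addresses, typed reads, frame facts, blocks         (1, 2, 4, 5 below)
          Vorbis/Fields/Offsets.lean   GENERATED by `c/gen_fields.py c/LAYOUT_STRUCTS.txt > Vorbis/Fields/Offsets.lean`:
                                       offsets and accessors of all 16 structs of the table (3 below). Never edit it, never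
                                       type an offset by hand: at the freeze the table is regenerated and so is this file.
          Vorbis/Fields/Attr.lean      the four simp sets `voff vacc vfield vblock`
  `import Vorbis.Fields`, `open X86 X86.User Asan Vorbis`.

  0. CONVENTIONS.  An address, a size, an index, a count on the invariant side is a `Nat`; a C `int` / `int16` VALUE is an
     `Int`; an unsigned value a `Nat`; a pointer VALUE a `Nat` (the address); a float its 32 bits as a `Nat` (opaque).
     `mem : Mem` is the flat memory (`u.mem`), `p f c g r m : Nat` the address of a struct.

  1. ADDRESSES: `Nat` in invariants, `Word` in the machine.
       addr (a : Nat) : Word              the machine word of a number; also "register r holds the number n": u.reg r = addr n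
       toNat_addr a (h : a < 2 ^ 64)      (addr a).toNat = a       the ONLY lemma with a bound (all addresses < 1000000H)
       addr_toNat w                       addr w.toNat = w         eq_addr w a (h : w.toNat = a) : w = addr a
       addr_add  addr_add_lit  addr_add_addr  addr_mul_lit  addr_mul_addr      [vfield]   no side condition:
                                          addr f + 2112 = addr (f + 2112),  addr c + addr k * 2 + 48 = addr (c + k * 2 + 48)
       addr_sub_lit (h : k ≤ a)   lit_eq_addr   addr_inj   has_addr   shadowAddr_eq_addr   region_at_eq_addr
       word (i : Int) : Word              a value sign-extended to 64 bits (movsxd);  word_nonneg : 0 ≤ i → word i = addr i.toNat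
       word32 (i : Int) : Word            a value sign-extended to 32 bits (movsx eax, …);  word32_nonneg
     So no wrap-around condition is ever stated: arithmetic happens inside `addr (…)`, on numbers.

  2. TYPED READS at a number address (namespace `X86.User.Mem`, so `mem.u32 a`).
       mem.u8 a  mem.u16 a  mem.u32 a  mem.u64 a : Nat     THE NORMAL FORM (`mem.u32 a` is `mem.readLE (addr a) 4`, by `id rfl`)
       mem.i8 a  mem.i16 a  mem.i32 a : Int                = sint8 / sint16 / sint32 of the unsigned read (`i32_def`)
       mem.ptr a : Nat  (= mem.u64 a)      mem.f32bits a : Nat  (= mem.u32 a)          `ptr_eq`, `f32bits_eq` [vacc]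
     ranges    u8_lt u16_lt u32_lt u64_lt ptr_lt f32bits_lt (`mem.u16 a < 2 ^ 16`),  i8_range i16_range i32_range
     signed ↔ unsigned    `have := mem.i32_cases a`, then `omega` decides everything (also i8_cases, i16_cases);
               u32_of_i32_nonneg  u16_of_i16_nonneg  i32_of_u32_lt;  for a plain number: sint32_cases n
     FROM THE STEPPER (`simp only [vfield]`, once the base register is rewritten to `addr f`: `rw [hr]` or `rw [eq_addr _ _ h]`):
               u.mem.readLE (addr a) 4                                            ↦ u.mem.u32 a     readLE_addr1 / 2 / 4 / 8
               UInt64.ofNat (mem.u64 a)                          mov rax, [m]     ↦ addr (mem.u64 a)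
               Word.ofBV (BitVec.ofNat 32 (mem.u32 a))           mov eax, [m]     ↦ addr (mem.u32 a)
               Word.ofBV (BitVec.zeroExtend 32 / 64 (BitVec.ofNat 8 / 16 …))  movzx   ↦ addr (mem.u8 a) / addr (mem.u16 a)
               Word.ofBV (BitVec.signExtend 64 (BitVec.ofNat 32 / 16 / 8 …))  movsxd  ↦ word (mem.i32 a) / (mem.i16 a) / (mem.i8 a)
               Word.ofBV (BitVec.signExtend 32 (BitVec.ofNat 16 / 8 …))       movsx   ↦ word32 (mem.i16 a) / (mem.i8 a)
               (BitVec.ofNat 32 (mem.u32 a)).toNat / .toInt      cmp, add …       ↦ mem.u32 a / mem.i32 a     (16, 8 likewise)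
               generic, for values that are not loads: ofBV_eq_addr  ofBV_signExtend64  ofBV_signExtend32  toInt_ofNat32 / 16 / 8

  3. OFFSETS AND ACCESSORS (generated; S a struct, x a field; `Residue.end` is spelt `Residue.end_`).
       Off.S.x   Off.sizeof.S               offset; size of the struct           Off.stb_vorbis.channels = 4, Off.sizeof.Mapping = 56
       Off.S.x.count   Off.S.x.elem         arrays: elements, bytes per element  Off.Codebook.fast_huffman.count = 1024, .elem = 2
       Off.S.x.count2                       x[count][count2], row-major: [j][k] is element count2 * j + k
       S.x mem p : T                        the field of the S at address p      stb_vorbis.channels mem f : Int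
       S.x mem p i     S.x mem p j k        an array element                     Codebook.fast_huffman mem c k : Int
                                                                                  Floor1.subclass_books mem g j k : Int
       S.x mem p : Nat  (pointer fields)    the address stored there             stb_vorbis.codebooks mem f
       S.x_at mem p i                       address of element i of what the pointer field x points to
                                            (stride = the pointee's size)        stb_vorbis.codebooks_at mem f i     (= cb(i))
                                                                                  Codebook.codeword_lengths_at mem c i
       S.x_at mem p c n                     the same for an array of pointers    stb_vorbis.channel_buffers_at mem f c n
       S.x_at p        S.x_at p i           address of an embedded struct / of element i of an embedded array of structs
                                                                                  stb_vorbis.mode_config_at f i, then Mode.mapping mem (…)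
       S.y.x mem p,  Off.S.y.x              fields of an embedded struct y, flattened          stb_vorbis.alloc.alloc_buffer mem f
                                            the union: Floor.floor1.values and Floor1.values are the same read (floor1 at offset 0)
     C type ↦ read: int, int32 ↦ i32 · unsigned int, uint32, enum ↦ u32 · uint8 ↦ u8 · int8, char ↦ i8 · uint16 ↦ u16 · int16 ↦ i16
               · float, codetype ↦ f32bits · any `T *` ↦ ptr · u64, word, uptr, double ↦ u64.
     `simp only [voff]`         offsets become numerals (then `omega`)
     `simp only [vacc, voff]`   accessors become typed reads at `p + numeral`:  stb_vorbis.channels mem f ↦ mem.i32 (f + 4),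
                                Codebook.fast_huffman mem c k ↦ mem.i16 (c + 48 + 2 * k).  THIS is the form in which an invariant
                                meets the stepper's output (2.), and the form `omega` and the frame facts work on.

  4. FRAME: one generic fact per read type; none per field. From the model's `Mem.EqOn lo hi mem mem'` (X86/Derived/User/Frame.lean):
       h.u32 a (h1 : lo ≤ a) (h2 : a + 4 ≤ hi) (h3 : hi ≤ 2 ^ 64) : mem'.u32 a = mem.u32 a       h.u8 h.u16 h.u64 h.i8 h.i16 h.i32 h.ptr h.f32bits
     and, an accessor being a typed read by definition, `exact h.i32 _ (by omega) (by omega) (by omega)` also proves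
     `stb_vorbis.channels mem' f = stb_vorbis.channels mem f` (after `simp only [vacc, voff]`).
       sources of EqOn    Mem.eqOn_writeLE mem w k v a n       one store of the walker at a word w, off [a, a + n)
                          Mem.SameExcept.eqOn hs lo hi hd      a callee's footprint (`Returned`) off [lo, hi);   Mem.EqOn.trans / .mono
       one store, direct  mem.u32_writeLE w k v a hw ha hd : (mem.writeLE w k v).u32 a = mem.u32 a    (u8 u16 u64 i8 i16 i32 ptr f32bits too)
       read back          mem.u32_writeLE_same a v : (mem.writeLE (addr a) 4 v).u32 a = v % 2 ^ 32     (all nine types);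
                          mem.i32_writeLE_same_bv a (x : BitVec 32) : (mem.writeLE (addr a) 4 x.toNat).i32 a = x.toInt

  5. BLOCKS AND CHECK SITES.  `structure Block where base size : Nat` — an object: a struct, an arena block, a stack object.
       B.contains a n   B.disjoint C   B.sub off size   B.mem x   B.top   B.span : Span       (`simp only [vblock]` unfolds them for `omega`)
       B.live Live        every byte of B is in the live set of Asan/Shadow.lean (= InLive Live B.base B.size);  live.sub  live.mono  live.inLive
       liveOf Bs          the live set of a list of blocks;  Block.live_of_mem : B ∈ Bs → B.live (liveOf Bs);  liveOf_cons  liveOf_mono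
       live.inside        B.live Live → Covers Live mem → 0 < B.size → 100000H ≤ B.base ∧ B.base + B.size ≤ C00000H
       B.Same mem mem'    = Mem.EqOn B.base (B.base + B.size) mem mem' (an abbreviation: use 4. on it);  Same.refl  .trans  .sub
                          Same.of_writeLE (a store inside a block C disjoint from B)     Same.of_sameExcept (a footprint off B)
     **acc_of_obj : Covers Live mem → B.live Live → B.base ≤ a → a + n ≤ B.base + B.size → 1 ≤ n → AccessibleSmall mem a n**
       acc_of_obj_range   … → Accessible mem a n                  (the 16- and N-byte checks)
       acc_of_field       … off + n ≤ B.size → 1 ≤ n → AccessibleSmall mem (B.base + off) n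
       acc_of_obj_addr / acc_of_obj_range_addr     the same about `(addr a).toNat`, the value of `rdi = addr a` at the call
       has_of_obj         … → L.Has (addr a) n                    the side condition of the access that follows the check
     Typical: a stack object `B` of the current protected frame is live (`ShadowInv.live_frame`); the check of its bytes is
     `acc_of_obj hc hB h1 h2 hn`. For anything the decoder invariant talks about, use the `site_…` lemma of the group (6.).
     TWO LEMMAS CALLED `acc_of_obj`, for two levels:
       Vorbis.acc_of_obj        (this file) over a `Block` and a live SET `Live : Nat → Prop`: what the decoder layer and the
                                `Site` API use; `Covers Live mem` is `ShadowInv.covers`.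
       Asan.Obj.acc_of_obj      (Asan/Objects.lean) over one `Obj` and `Covers o.Bytes mem`: what the shadow layer uses while
                                it ESTABLISHES the cover of an object (`ShadowOK.obj`, the allocator's and prologue's lemmas).
                                Vorbis/ObjBlock.lean connects the two (`Obj.block_live`, `ShadowInv.live_other / live_frame`).

  6. THE ONE VOCABULARY OF THE PREDICATE LAYER (Vorbis/Blocks.lean; its header is the documentation; Vorbis/INVARIANT-GUIDE.md):
       Site Live a n      the result of every USE lemma of every group: `.acc hc`, `.acc_addr hc`, `.has hc hL`, `.inside hc`
       Blk : Block → Prop "is an allocated block", the parameter of every SHAPE clause; laws `BlkOK Blk`, `BlkLive Blk Live`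
       B.Kept mem mem'    a block whose content a clause reads survives;  AllKept Blk mem mem'
       ObjEq ws mem p mem' f   windows of `*f` in two memories at two addresses; instances `ObjSame`, `DecodeSame`, `Copied`
       P.transfer         the two-address frame lemma of a group;  `Move`, `Group`, `Group.Moves / Carries / Stable`
       objBlock f   bsize mem f b   nchan mem f
-/
import Vorbis.Fields.Offsets
import Vorbis.Blocks
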